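-- pv_equiv track=rewrite | github.com/gAngelov24/Coding_Practice | Python_Practice/HackerRank_SWE_Prep_Kit/Remove_Elements_Within_K_Distance.py | debounceTimestamps
-- ===== SOURCE A (Python) =====
-- def debounceTimestamps(timestamps, K):
--     # Write your code here
--     i = 1
--     while i < len(timestamps):
--         curr = timestamps[i]
--         prev = timestamps[i-1]
--         if curr - prev >= K:
--             i+=1
--             continue
--         timestamps.remove(curr)
--     return len(timestamps)
-- ===== SOURCE B (Python) =====
-- def debounceTimestamps(timestamps, K):
--     count = 0
--     last = None
--     for t in timestamps:
--         if last is None or t - last >= K: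
--             count += 1
--             last = t
--     return count
-- ===== Notes on version B (the rewrite author's own statement) =====
-- stated objective: faster
-- what changed: Replace the quadratic while-loop that repeatedly calls list.remove (an O(n) scan-and-shift per dropped element) with a single pass that tracks the last kept timestamp and a counter, never mutating the list.
-- outside the precondition, e.g. on debounceTimestamps([-2, 0, -2, -1], 1): A returns 3, B returns 2
import Mathlib
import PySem

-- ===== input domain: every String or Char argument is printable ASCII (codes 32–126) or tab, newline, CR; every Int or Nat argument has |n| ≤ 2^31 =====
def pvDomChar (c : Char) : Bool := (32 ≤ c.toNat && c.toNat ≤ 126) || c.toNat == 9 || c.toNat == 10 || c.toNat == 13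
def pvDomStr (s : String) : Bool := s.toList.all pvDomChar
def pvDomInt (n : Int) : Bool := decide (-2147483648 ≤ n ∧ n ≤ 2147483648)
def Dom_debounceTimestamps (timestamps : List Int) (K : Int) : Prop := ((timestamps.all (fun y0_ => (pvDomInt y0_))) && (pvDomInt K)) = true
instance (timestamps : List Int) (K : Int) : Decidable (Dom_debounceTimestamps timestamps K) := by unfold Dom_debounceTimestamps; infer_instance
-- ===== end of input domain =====

-- A = quadratic while-loop using list.remove (A mutates its argument in place; the
-- equivalence proved here is about the RETURN value only); B = one linear pass tracking
-- the last kept timestamp.  Claimed on duplicate-free lists (see Pre_ below).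


-- ===== PORT A =====
-- the while-loop: state is the (mutated) list and the index i.
-- timestamps[i] / timestamps[i-1] are in range whenever read (i < len, 1 ≤ i), so the
-- guarded getElem / getD are exact; timestamps.remove(curr) with curr ∈ list is exactly
-- List.erase (PySem remove?_eq_some_erase).
def debounceTimestampsLoop (K : Int) : Nat → List Int → Nat → List Int
  | 0, ts, _ => ts                                   -- fuel only for totality: ts.length steps always suffice
  | fuel + 1, ts, i =>
    if h : i < ts.length then
      let curr := ts[i]
      let prev := ts.getD (i - 1) 0
      if curr - prev ≥ K then
        debounceTimestampsLoop K fuel ts (i + 1)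
      else
        debounceTimestampsLoop K fuel (ts.erase curr) i
    else ts

def debounceTimestamps (timestamps : List Int) (K : Int) : Int :=
  ((debounceTimestampsLoop K timestamps.length timestamps 1).length : Int)

-- ===== PORT B =====
-- the for-loop: fold over the list with state (count, last kept timestamp or none).
def debounceTimestamps_alt (timestamps : List Int) (K : Int) : Int :=
  (timestamps.foldl
    (fun (st : Int × Option Int) t =>
      if (match st.2 with | none => true | some l => decide (t - l ≥ K)) then
        (st.1 + 1, some t)
      else st)
    (0, none)).1

-- ===== PRECONDITION & SPEC =====
-- Pre_ excludes lists with duplicate values: there A's remove-by-value deletes the FIRST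
-- occurrence of the value — possibly an earlier, already-kept element — so which element
-- survives (and hence the count) is an accident of list.remove, not a specified behaviour.
def Pre_debounceTimestamps (timestamps : List Int) (K : Int) : Prop := timestamps.Nodup
instance (timestamps : List Int) (K : Int) : Decidable (Pre_debounceTimestamps timestamps K) := by unfold Pre_debounceTimestamps; infer_instance
def pvWitness_debounceTimestamps : List Int × Int := ([1, 3, 10, 11], 2)
def Spec_debounceTimestamps (timestamps : List Int) (K : Int) (out : Int) : Prop := out = debounceTimestamps_alt timestamps K
instance (timestamps : List Int) (K : Int) (out : Int) : Decidable (Spec_debounceTimestamps timestamps K out) := by unfold Spec_debounceTimestamps; infer_instance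

-- ===== CLAIM (what is proved, stated in full; the proofs are below) =====
def Claim_equal_debounceTimestamps : Prop := ∀ (timestamps : List Int) (K : Int), Dom_debounceTimestamps timestamps K → Pre_debounceTimestamps timestamps K → Spec_debounceTimestamps timestamps K (debounceTimestamps timestamps K)

-- ===== LEMMAS AND PROOFS =====

-- pure count of kept elements, given the last kept timestamp l
def bCount (K : Int) (l : Int) : List Int → Int
  | [] => 0
  | t :: rest => if t - l ≥ K then 1 + bCount K t rest else bCount K l rest

theorem bfold (K : Int) : ∀ (xs : List Int) (c l : Int),
    (xs.foldl
      (fun (st : Int × Option Int) t =>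
        if (match st.2 with | none => true | some l => decide (t - l ≥ K)) then
          (st.1 + 1, some t)
        else st)
      (c, some l)).1 = c + bCount K l xs := by
  intro xs
  induction xs with
  | nil => intro c l; simp [bCount]
  | cons t rest ih =>
    intro c l
    by_cases h : t - l ≥ K
    · simp [List.foldl, h, bCount, ih]; ring
    · simp [List.foldl, h, bCount, ih]

theorem erase_at (ts : List Int) (i : Nat) (hn : ts.Nodup) (h : i < ts.length) :
    ts.erase ts[i] = ts.take i ++ ts.drop (i + 1) := by
  have hsplit : ts = ts.take i ++ ts.drop i := (List.take_append_drop i ts).symm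
  have hdrop : ts[i] :: ts.drop (i + 1) = ts.drop i := List.getElem_cons_drop h
  have hnotmem : ts[i] ∉ ts.take i := by
    have hnd : (ts.take i ++ ts.drop i).Nodup := by rw [← hsplit]; exact hn
    have hdisj := (List.nodup_append.mp hnd).2.2
    intro hmem
    have h2 : ts[i] ∈ ts.drop i := by rw [← hdrop]; exact List.mem_cons_self ..
    exact hdisj _ hmem _ h2 rfl
  calc ts.erase ts[i] = (ts.take i ++ ts.drop i).erase ts[i] := by rw [← hsplit]
    _ = ts.take i ++ (ts.drop i).erase ts[i] := List.erase_append_right _ hnotmem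
    _ = ts.take i ++ ts.drop (i + 1) := by rw [← hdrop, List.erase_cons_head]

theorem main_loop (K : Int) : ∀ (n : ℕ) (ts : List Int) (i : Nat),
    ts.length - i ≤ n → ts.Nodup → 1 ≤ i → i ≤ ts.length →
    ((debounceTimestampsLoop K n ts i).length : Int)
      = (i : Int) + bCount K (ts.getD (i - 1) 0) (ts.drop i) := by
  intro n
  induction n with
  | zero =>
    intro ts i hn _ _ hle
    have hi : i = ts.length := by omega
    simp [debounceTimestampsLoop, hi, bCount]
  | succ n ih =>
    intro ts i hfuel hnd h1 hle
    rw [debounceTimestampsLoop]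
    by_cases h : i < ts.length
    · simp only [h, dif_pos]
      have hdrop : ts[i] :: ts.drop (i + 1) = ts.drop i := List.getElem_cons_drop h
      by_cases hk : ts[i] - ts.getD (i - 1) 0 ≥ K
      · rw [if_pos hk]
        have := ih ts (i + 1) (by omega) hnd (by omega) (by omega)
        rw [this]
        have hgd : ts.getD (i + 1 - 1) 0 = ts[i] := by
          simp [List.getD_eq_getElem?_getD, List.getElem?_eq_getElem h]
        rw [hgd, ← hdrop, bCount, if_pos hk]
        push_cast; ring
      · rw [if_neg hk]
        set ts' := ts.erase ts[i] with hts'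
        have he : ts' = ts.take i ++ ts.drop (i + 1) := erase_at ts i hnd h
        have hlen : ts'.length = ts.length - 1 := List.length_erase_of_mem (List.getElem_mem h)
        have hnd' : ts'.Nodup := hnd.erase _
        have htk : (ts.take i).length = i := by simp; omega
        have hgd' : ts'.getD (i - 1) 0 = ts.getD (i - 1) 0 := by
          rw [he, List.getD_eq_getElem?_getD, List.getElem?_append_left (by omega),
            ← List.getD_eq_getElem?_getD, List.getD_eq_getElem?_getD, List.getElem?_take_of_lt (by omega),
            ← List.getD_eq_getElem?_getD]
        have hdr' : ts'.drop i = ts.drop (i + 1) := by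
          rw [he, List.drop_left' htk]
        have := ih ts' i (by omega) hnd' h1 (by omega)
        rw [this, hgd', hdr', ← hdrop, bCount, if_neg hk]
    · simp only [h]
      have hi : i = ts.length := by omega
      simp [hi, bCount]

-- ===== VERDICT (by name: the statement is the Claim_ definition above) =====
theorem debounceTimestamps_spec : Claim_equal_debounceTimestamps := by
  intro ts K _ hpre
  unfold Spec_debounceTimestamps debounceTimestamps debounceTimestamps_alt
  cases ts with
  | nil =>
    simp [debounceTimestampsLoop]
  | cons t rest =>
    have hmain := main_loop K (t :: rest).length (t :: rest) 1 (by simp) hpre (by omega) (by simp)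
    have hstep : ((t :: rest).foldl
        (fun (st : Int × Option Int) t' =>
          if (match st.2 with | none => true | some l => decide (t' - l ≥ K)) then
            (st.1 + 1, some t')
          else st)
        (0, none)).1 = 0 + 1 + bCount K t rest := by
      rw [List.foldl_cons]
      simp only [if_pos]
      exact bfold K rest (0 + 1) t
    rw [hstep, hmain]
    simp
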